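-- pv_equiv track=rewrite | github.com/mateuszwroobel/DSA | leetcode, SPOJ, szkopul/SPOJ/dp/rock.py | rock
-- ===== SOURCE A (Python) =====
-- def rock(A,n):
--     inf = float('inf')
--     #okreslam funkcje rekurencyjna:
--     #f(i,j) - suma dlugosci fragmentow ktore mozna pociac dla przedzialu A[i...j]
--     dp = [[-inf for _ in range(n)] for _ in range(n)]
--
--     #sprawdzam czy bede mogl pociac dany przedzial
--     sums = [[0 for _ in range(n)]for _ in range (n)]
--     can_cut = [[False for _ in range(n)]for _ in range (n)]
--
--     #base case
--     for i in range(n):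
--         dp[i][i] = A[i]
--
--     #prefix sum
--     prefix = [0] * (n+1)
--     for i in range(n):
--         prefix[i+1] = prefix[i] + A[i]
--
--     #sum for each (i,j)
--     for i in range(n):
--         for j in range(i,n):
--             sums[i][j] = prefix[j+1] - prefix[i]
--             if sums[i][j] > (j-i+1)//2:
--                 can_cut[i][j] = True
--
--     def f(i,j):
--         if i < 0 or j < 0: return 0
--         if dp[i][j] != -inf: return dp[i][j]
--         if can_cut[i][j]:
--             len_of_fragment = j-i+1
--             dp[i][j] = len_of_fragment
--             return len_of_fragment
--         else:
--             dp[i][j] = max(f(i,k) + f(k+1,j) for k in range(i,j))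
--
--         return dp[i][j]
--
--     return f(0,n-1)
-- ===== SOURCE B (Python) =====
-- def rock(A, n):
--     # Bottom-up iterative interval DP (no recursion, no memo sentinel):
--     # dp keyed by (i, j), filled by increasing interval length L.
--     if n <= 0:
--         return 0
--     prefix = [0] * (n + 1)
--     for i in range(n):
--         prefix[i + 1] = prefix[i] + A[i]
--     dp = {}
--     for i in range(n):
--         dp[(i, i)] = A[i]
--     for L in range(2, n + 1):
--         for i in range(n - L + 1):
--             j = i + L - 1
--             if prefix[j + 1] - prefix[i] > L // 2:
--                 dp[(i, j)] = L
--             else: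
--                 dp[(i, j)] = max(dp[(i, k)] + dp[(k + 1, j)] for k in range(i, j))
--     return dp[(0, n - 1)]
-- ===== Notes on version B (the rewrite author's own statement) =====
-- stated objective: alternative
-- what changed: Replaced the memoized top-down recursion (float -inf sentinel table, recursive f with memo check) by a bottom-up iterative interval DP: a dict dp[(i,j)] filled by increasing interval length L, with can_cut decided inline from the prefix sums; no recursion or memo check remains.
import Mathlib
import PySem

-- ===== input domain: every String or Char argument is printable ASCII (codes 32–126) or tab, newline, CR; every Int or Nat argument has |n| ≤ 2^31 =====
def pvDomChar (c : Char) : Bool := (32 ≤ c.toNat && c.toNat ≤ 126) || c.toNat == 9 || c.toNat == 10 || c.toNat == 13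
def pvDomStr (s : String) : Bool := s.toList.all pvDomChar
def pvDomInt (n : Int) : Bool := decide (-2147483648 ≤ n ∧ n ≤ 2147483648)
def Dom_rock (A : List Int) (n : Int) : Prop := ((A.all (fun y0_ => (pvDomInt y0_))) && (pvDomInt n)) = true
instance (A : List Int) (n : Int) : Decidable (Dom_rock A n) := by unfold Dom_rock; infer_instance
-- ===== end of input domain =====

-- B is a bottom-up iterative interval DP (dict filled by increasing length) replacing A's memoized
-- top-down recursion; same values, same O(n^3) cost (objective: alternative decomposition).

-- ===== PORT A =====
-- prefix[0..n]: preallocated [0]*(n+1), then prefix[i+1] = prefix[i] + A[i] for i in range(n)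
-- (i ≥ 0 inside the range, so .toNat on the set-index is exact; A[i] raises IndexError when
-- 1 ≤ n > len(A) — those inputs are excluded by Pre_rock, pyGetD's default is never read inside it).
-- Source B builds the identical prefix array with the identical loop, so the helper is shared.
def pvPrefix (A : List Int) (n : Int) : List Int :=
  (PySem.List.pyRange 0 n 1).foldl
    (fun pre i =>
      pre.set (i + 1).toNat (PySem.List.pyGetD pre i 0 + PySem.List.pyGetD A i 0))
    (List.replicate (n + 1).toNat 0)

-- sums[i][j] = prefix[j+1] - prefix[i] and can_cut[i][j]: A's tables, ported as their defining
-- expressions of (i, j) (A fills them once from prefix and only reads them back).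
def pvSum (A : List Int) (n i j : Int) : Int :=
  PySem.List.pyGetD (pvPrefix A n) (j + 1) 0 - PySem.List.pyGetD (pvPrefix A n) i 0

def pvCanCut (A : List Int) (n i j : Int) : Bool :=
  pvSum A n i j > PySem.Int.floordiv (j - i + 1) 2

-- max(<generator>): first element, then running max; Python raises ValueError on an empty
-- iterable — both Pythons only call max on the nonempty range(i, j) with i < j, so the [] arm
-- is unreachable there. Both Pythons call max() the same way, so the helper is shared.
def pvMaxGen (l : List Int) : Int :=
  match l with
  | [] => 0
  | c :: cs => cs.foldl max c

-- A's recursive f(i, j). The memo table dp caches the values of this pure recursion (ints never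
-- compare equal to the float -inf sentinel), with dp[i][i] = A[i] preset by the base-case loop;
-- the memo is value-transparent, so it is ported as the recursion itself with the preset base case.
def rockF (A : List Int) (n i j : Int) : Int :=
  if i < 0 ∨ j < 0 then 0
  else if i = j then PySem.List.pyGetD A i 0      -- memo hit on the preset dp[i][i] = A[i]
  else if pvCanCut A n i j then j - i + 1
  else pvMaxGen ((PySem.List.pyRange i j 1).attach.map
        (fun k => rockF A n i k.1 + rockF A n (k.1 + 1) j))
termination_by (j - i).toNat
decreasing_by
  · have h := (PySem.List.mem_pyRange_one).mp k.2; omega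
  · have h := (PySem.List.mem_pyRange_one).mp k.2; omega

def rock (A : List Int) (n : Int) : Int := rockF A n 0 (n - 1)

-- ===== PORT B =====
-- Source B: if n <= 0 return 0; prefix sums (pvPrefix, the identical loop); dp = {} keyed by (i, j);
-- base loop dp[(i,i)] = A[i]; then for L in range(2, n+1), for i in range(n-L+1): fill dp[(i,j)].
-- dp[(0, n-1)] at the end always exists for n ≥ 1 (KeyError impossible), ported with getD.
def rock_alt (A : List Int) (n : Int) : Int :=
  if n ≤ 0 then 0
  else
    ((PySem.List.pyRange 2 (n + 1) 1).foldl
      (fun d L =>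
        (PySem.List.pyRange 0 (n - L + 1) 1).foldl
          (fun d i =>
            -- j = i + L - 1, inlined
            if PySem.List.pyGetD (pvPrefix A n) (i + L - 1 + 1) 0 - PySem.List.pyGetD (pvPrefix A n) i 0 >
                PySem.Int.floordiv L 2 then
              d.insert (i, i + L - 1) L
            else
              d.insert (i, i + L - 1)
                (pvMaxGen ((PySem.List.pyRange i (i + L - 1) 1).map
                  (fun k => d.getD (i, k) 0 + d.getD (k + 1, i + L - 1) 0))))
          d)
      ((PySem.List.pyRange 0 n 1).foldl
        (fun d i => d.insert (i, i) (PySem.List.pyGetD A i 0))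
        (PySem.Dict.empty : PySem.Dict (Int × Int) Int))).getD (0, n - 1) 0

-- ===== PRECONDITION & SPEC =====
-- A indexes A[i] for i in range(n): it raises IndexError exactly when 1 ≤ n and n > len(A);
-- Pre_rock admits every input on which the Python A returns (n ≤ 0 returns 0 for any A).
def Pre_rock (A : List Int) (n : Int) : Prop := n ≤ (A.length : Int)
instance (A : List Int) (n : Int) : Decidable (Pre_rock A n) := by unfold Pre_rock; infer_instance

def pvWitness_rock : List Int × Int := ([1, 1, 1], 3)

def Spec_rock (A : List Int) (n : Int) (out : Int) : Prop := out = rock_alt A n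
instance (A : List Int) (n : Int) (out : Int) : Decidable (Spec_rock A n out) := by unfold Spec_rock; infer_instance

-- ===== CLAIM (what is proved, stated in full; the proofs are below) =====
def Claim_equal_rock : Prop := ∀ (A : List Int) (n : Int), Dom_rock A n → Pre_rock A n → Spec_rock A n (rock A n)

-- ===== LEMMAS AND PROOFS =====

-- the invariant: d holds the value of A's f at every interval of length ≤ m
def pvGood (A : List Int) (n : Int) (d : PySem.Dict (Int × Int) Int) (m : Int) : Prop :=
  ∀ i j : Int, 0 ≤ i → i ≤ j → j < n → j - i + 1 ≤ m →
    d.get? (i, j) = some (rockF A n i j)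

lemma pvBase_get? (A : List Int) (l : List Int) (d : PySem.Dict (Int × Int) Int) (i j : Int) :
    ((l.foldl (fun d i => d.insert (i, i) (PySem.List.pyGetD A i 0)) d).get? (i, j)) =
      if i = j ∧ i ∈ l then some (PySem.List.pyGetD A i 0) else d.get? (i, j) := by
  induction l generalizing d with
  | nil => simp
  | cons x l ih =>
    simp only [List.foldl_cons, ih, PySem.Dict.get?_insert, List.mem_cons, Prod.mk.injEq]
    by_cases hij : i = j
    · subst hij
      by_cases hl : i ∈ l
      · simp [hl]
      · by_cases hx : i = x
        · simp [hx]
        · simp [hl, hx]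
    · have hnx : ¬ (i = x ∧ j = x) := by rintro ⟨rfl, rfl⟩; exact hij rfl
      simp [hij, hnx]

lemma pvGood_base (A : List Int) (n : Int) :
    pvGood A n ((PySem.List.pyRange 0 n 1).foldl
      (fun d i => d.insert (i, i) (PySem.List.pyGetD A i 0)) PySem.Dict.empty) 1 := by
  intro i j hi hij hjn hlen
  have hij' : i = j := by omega
  have hmem : i ∈ PySem.List.pyRange 0 n 1 := PySem.List.mem_pyRange_one.mpr (by omega)
  rw [pvBase_get?]
  subst hij'
  simp only [hmem, and_self, if_true]
  rw [rockF]
  have hneg : ¬ (i < 0 ∨ i < 0) := by omega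
  rw [if_neg hneg, if_pos rfl]

-- unfold A's f at an interval of length ≥ 2
lemma rockF_of_lt (A : List Int) (n i j : Int) (hi : 0 ≤ i) (hij : i < j) :
    rockF A n i j =
      if pvCanCut A n i j then j - i + 1
      else pvMaxGen ((PySem.List.pyRange i j 1).map
        (fun k => rockF A n i k + rockF A n (k + 1) j)) := by
  rw [rockF]
  have h1 : ¬ (i < 0 ∨ j < 0) := by omega
  have h2 : i ≠ j := by omega
  simp only [h1, if_false, h2, if_false]
  congr 1
  simp only [List.map_subtype, List.unattach_attach]

-- one inner-loop step at (i, j = i+L-1) computes f i j, and preserves every stored value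
lemma pvGood_inner (A : List Int) (n L : Int) (hL : 2 ≤ L) :
    ∀ (l : List Int) (d : PySem.Dict (Int × Int) Int),
      (∀ x ∈ l, 0 ≤ x ∧ x ≤ n - L) →
      pvGood A n d (L - 1) →
      (∀ i : Int, 0 ≤ i → i ≤ n - L → i ∉ l → d.get? (i, i + L - 1) = some (rockF A n i (i + L - 1))) →
      pvGood A n (l.foldl
        (fun d i =>
          if PySem.List.pyGetD (pvPrefix A n) (i + L - 1 + 1) 0 - PySem.List.pyGetD (pvPrefix A n) i 0 >
              PySem.Int.floordiv L 2 then
            d.insert (i, i + L - 1) L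
          else
            d.insert (i, i + L - 1)
              (pvMaxGen ((PySem.List.pyRange i (i + L - 1) 1).map
                (fun k => d.getD (i, k) 0 + d.getD (k + 1, i + L - 1) 0)))) d) (L - 1) ∧
      (∀ i : Int, 0 ≤ i → i ≤ n - L →
        ((l.foldl
          (fun d i =>
            if PySem.List.pyGetD (pvPrefix A n) (i + L - 1 + 1) 0 - PySem.List.pyGetD (pvPrefix A n) i 0 >
                PySem.Int.floordiv L 2 then
              d.insert (i, i + L - 1) L
            else
              d.insert (i, i + L - 1)
                (pvMaxGen ((PySem.List.pyRange i (i + L - 1) 1).map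
                  (fun k => d.getD (i, k) 0 + d.getD (k + 1, i + L - 1) 0)))) d).get? (i, i + L - 1))
          = some (rockF A n i (i + L - 1))) := by
  intro l
  induction l with
  | nil =>
    intro d _ hgood hrest
    exact ⟨hgood, fun i hi hin => hrest i hi hin (List.not_mem_nil)⟩
  | cons x l ih =>
    intro d hbnd hgood hrest
    have hx := hbnd x List.mem_cons_self
    simp only [List.foldl_cons]
    have harith : x + L - 1 - x + 1 = L := by omega
    -- the value inserted for key (x, x+L-1) is rockF A n x (x+L-1)
    have hval :
        (if PySem.List.pyGetD (pvPrefix A n) (x + L - 1 + 1) 0 - PySem.List.pyGetD (pvPrefix A n) x 0 >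
            PySem.Int.floordiv L 2 then
          d.insert (x, x + L - 1) L
        else
          d.insert (x, x + L - 1)
            (pvMaxGen ((PySem.List.pyRange x (x + L - 1) 1).map
              (fun k => d.getD (x, k) 0 + d.getD (k + 1, x + L - 1) 0)))) =
        d.insert (x, x + L - 1) (rockF A n x (x + L - 1)) := by
      have hxj : x < x + L - 1 := by omega
      by_cases hc : PySem.List.pyGetD (pvPrefix A n) (x + L - 1 + 1) 0 - PySem.List.pyGetD (pvPrefix A n) x 0 >
          PySem.Int.floordiv L 2
      · rw [if_pos hc]
        have hcc : pvCanCut A n x (x + L - 1) = true := by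
          unfold pvCanCut pvSum
          rw [harith]
          exact decide_eq_true hc
        rw [rockF_of_lt A n x (x + L - 1) hx.1 hxj, hcc, if_pos rfl, harith]
      · rw [if_neg hc]
        have hcc : pvCanCut A n x (x + L - 1) = false := by
          unfold pvCanCut pvSum
          rw [harith]
          exact decide_eq_false hc
        rw [rockF_of_lt A n x (x + L - 1) hx.1 hxj, hcc]
        simp only [Bool.false_eq_true, if_false]
        congr 2
        apply List.map_congr_left
        intro k hk
        have hkb := PySem.List.mem_pyRange_one.mp hk
        have h1 : d.getD (x, k) 0 = rockF A n x k := by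
          rw [PySem.Dict.getD_eq_get?_getD, hgood x k hx.1 (by omega) (by omega) (by omega)]
          rfl
        have h2 : d.getD (k + 1, x + L - 1) 0 = rockF A n (k + 1) (x + L - 1) := by
          rw [PySem.Dict.getD_eq_get?_getD,
            hgood (k + 1) (x + L - 1) (by omega) (by omega) (by omega) (by omega)]
          rfl
        rw [h1, h2]
    rw [hval]
    apply ih
    · intro y hy; exact hbnd y (List.mem_cons_of_mem _ hy)
    · -- inserting the length-L key preserves all shorter entries
      intro i j hi hij hjn hlen
      rw [PySem.Dict.get?_insert]
      have hne : ¬ ((i, j) = (x, x + L - 1)) := by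
        intro h
        have h1 : i = x := congrArg Prod.fst h
        have h2 : j = x + L - 1 := congrArg Prod.snd h
        omega
      rw [if_neg hne]
      exact hgood i j hi hij hjn hlen
    · intro i hi hin hnot
      rw [PySem.Dict.get?_insert]
      by_cases hix : i = x
      · simp [hix]
      · have hne : ¬ ((i, i + L - 1) = (x, x + L - 1)) := by
          intro h; exact hix (congrArg Prod.fst h)
        rw [if_neg hne]
        exact hrest i hi hin (by simp [hix, hnot])

-- the outer loop over L: starting from Good (a-1), running L = a, …, n yields Good n
lemma pvGood_outer (A : List Int) (n : Int) :
    ∀ (a : Int) (d : PySem.Dict (Int × Int) Int), 2 ≤ a →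
      pvGood A n d (a - 1) →
      pvGood A n
        ((PySem.List.pyRange a (n + 1) 1).foldl
          (fun d L =>
            (PySem.List.pyRange 0 (n - L + 1) 1).foldl
              (fun d i =>
                if PySem.List.pyGetD (pvPrefix A n) (i + L - 1 + 1) 0 - PySem.List.pyGetD (pvPrefix A n) i 0 >
                    PySem.Int.floordiv L 2 then
                  d.insert (i, i + L - 1) L
                else
                  d.insert (i, i + L - 1)
                    (pvMaxGen ((PySem.List.pyRange i (i + L - 1) 1).map
                      (fun k => d.getD (i, k) 0 + d.getD (k + 1, i + L - 1) 0))))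
              d)
          d)
        n := by
  intro a
  induction hwf : (n + 1 - a).toNat using Nat.strong_induction_on generalizing a with
  | _ fuel ih =>
    intro d ha hgood
    by_cases hend : n + 1 ≤ a
    · have : PySem.List.pyRange a (n + 1) 1 = [] := by
        simp [PySem.List.pyRange_one, Int.toNat_of_nonpos (by omega : n + 1 - a ≤ 0)]
      rw [this]
      intro i j hi hij hjn hlen
      exact hgood i j hi hij hjn (by omega)
    · have hcons : PySem.List.pyRange a (n + 1) 1 = a :: PySem.List.pyRange (a + 1) (n + 1) 1 :=
        PySem.List.pyRange_one_cons (by omega)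
      rw [hcons, List.foldl_cons]
      have hinner := pvGood_inner A n a ha (PySem.List.pyRange 0 (n - a + 1) 1) d
        (fun x hx => by have := PySem.List.mem_pyRange_one.mp hx; omega)
        hgood
        (fun i hi hin hnot => by
          exact absurd (PySem.List.mem_pyRange_one.mpr (by omega)) hnot)
      obtain ⟨hgood', hlenA⟩ := hinner
      have hnextGood : pvGood A n
          ((PySem.List.pyRange 0 (n - a + 1) 1).foldl
            (fun d i =>
              if PySem.List.pyGetD (pvPrefix A n) (i + a - 1 + 1) 0 - PySem.List.pyGetD (pvPrefix A n) i 0 >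
                  PySem.Int.floordiv a 2 then
                d.insert (i, i + a - 1) a
              else
                d.insert (i, i + a - 1)
                  (pvMaxGen ((PySem.List.pyRange i (i + a - 1) 1).map
                    (fun k => d.getD (i, k) 0 + d.getD (k + 1, i + a - 1) 0))))
            d) a := by
        intro i j hi hij hjn hlen
        by_cases hsh : j - i + 1 ≤ a - 1
        · exact hgood' i j hi hij hjn hsh
        · have hj : j = i + a - 1 := by omega
          rw [hj]
          exact hlenA i hi (by omega)
      exact ih (n + 1 - (a + 1)).toNat (by omega) (a + 1) rfl _ (by omega)
        (by simpa using hnextGood)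

theorem pv_rock_eq (A : List Int) (n : Int) : rock A n = rock_alt A n := by
  unfold rock rock_alt
  by_cases hn : n ≤ 0
  · rw [if_pos hn, rockF, if_pos (Or.inr (by omega : n - 1 < 0))]
  · rw [if_neg hn]
    have hfinal := pvGood_outer A n 2 _ (le_refl 2) (by simpa using pvGood_base A n)
    have h := hfinal 0 (n - 1) (le_refl 0) (by omega) (by omega) (by omega)
    rw [PySem.Dict.getD_eq_get?_getD, h]
    rfl

-- ===== VERDICT (by name: the statement is the Claim_ definition above) =====
theorem rock_spec : Claim_equal_rock := by
  intro A n _ _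
  unfold Spec_rock
  exact pv_rock_eq A n
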